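-- pv_equiv track=rewrite | github.com/GiulioUmbrella/Applied-Cryptography-with-Python | binary_ops.py | is_greater
-- ===== SOURCE A (Python) =====
-- def is_equal(m,n):
--     if len(m) != len(n):
--         return False
--
--     i = 0
--     while i < len(m) and m[i] == n[i]:
--         i += 1
--     return i == len(m)
--
-- def is_greater(m,n):
--
--     if is_equal(m,n):
--         return False
--
--     if len(m) > len(n):
--         return True
--     elif len(n) > len(m):
--         return False
--     else:
--         i = 0
--         while i < len(m) and m[i] == n[i]:
--             i += 1
--         return m[i] > n[i]
-- ===== SOURCE B (Python) =====
-- def is_greater(m, n):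
--     if len(m) != len(n):
--         return len(m) > len(n)
--     # Single backwards pass with an overwrite accumulator: the leftmost
--     # differing pair is processed last, so it decides the result.
--     acc = False
--     for a, b in reversed(list(zip(m, n))):
--         if a > b:
--             acc = True
--         elif a < b:
--             acc = False
--     return acc
-- ===== Notes on version B (the rewrite author's own statement) =====
-- stated objective: alternative
-- what changed: Replaces A's is_equal pre-scan plus forward early-exit index loop by a single reversed traversal of the zipped pairs with an overwrite accumulator (the leftmost difference, processed last, decides); equality falls out as the accumulator's initial False, so no pre-scan or early exit exists.
import Mathlib
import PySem

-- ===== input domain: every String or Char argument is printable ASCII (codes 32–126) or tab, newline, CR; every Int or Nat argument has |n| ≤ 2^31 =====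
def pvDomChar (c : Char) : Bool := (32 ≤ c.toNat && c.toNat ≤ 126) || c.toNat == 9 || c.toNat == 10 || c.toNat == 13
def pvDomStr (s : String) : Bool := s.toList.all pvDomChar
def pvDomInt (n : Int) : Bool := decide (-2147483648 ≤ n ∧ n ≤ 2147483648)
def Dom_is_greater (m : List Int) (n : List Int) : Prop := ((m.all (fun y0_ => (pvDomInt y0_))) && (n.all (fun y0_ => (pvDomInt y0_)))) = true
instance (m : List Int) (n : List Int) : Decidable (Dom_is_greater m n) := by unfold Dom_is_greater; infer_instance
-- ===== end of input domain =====

-- B replaces A's is_equal pre-scan plus forward early-exit index loop by one length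
-- test and a single reversed-order fold over the zipped pairs with an overwrite
-- accumulator (alternative decomposition, same cost).

-- ===== PORT A =====
-- while i < len(m) and m[i] == n[i]: i += 1   — returns the final i
def pvWhileEq (m : List Int) (n : List Int) (i : Nat) : Nat :=
  if i < m.length ∧ PySem.List.pyGet? m (i : Int) = PySem.List.pyGet? n (i : Int) then
    pvWhileEq m n (i + 1)
  else i
termination_by m.length - i

def is_equal (m : List Int) (n : List Int) : Bool :=
  if m.length ≠ n.length then false
  else decide (pvWhileEq m n 0 = m.length)

def is_greater (m : List Int) (n : List Int) : Bool :=
  if is_equal m n then false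
  else if m.length > n.length then true
  else if n.length > m.length then false
  else
    let i := pvWhileEq m n 0
    -- m[i] > n[i]; the none case is unreachable on A's returning inputs (totality guard)
    match PySem.List.pyGet? m (i : Int), PySem.List.pyGet? n (i : Int) with
    | some a, some b => decide (a > b)
    | _, _ => false

-- ===== PORT B =====
-- the loop body: if a > b: acc = True elif a < b: acc = False
def pvStep (acc : Bool) (p : Int × Int) : Bool :=
  if p.1 > p.2 then true else if p.1 < p.2 then false else acc

def is_greater_alt (m : List Int) (n : List Int) : Bool :=
  if m.length ≠ n.length then decide (m.length > n.length)
  else ((m.zip n).reverse).foldl pvStep false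

-- ===== PRECONDITION & SPEC =====
def Spec_is_greater (m : List Int) (n : List Int) (out : Bool) : Prop := out = is_greater_alt m n
instance (m : List Int) (n : List Int) (out : Bool) : Decidable (Spec_is_greater m n out) := by unfold Spec_is_greater; infer_instance

-- ===== CLAIM (what is proved, stated in full; the proofs are below) =====
def Claim_equal_is_greater : Prop := ∀ (m : List Int) (n : List Int), Dom_is_greater m n → Spec_is_greater m n (is_greater m n)

-- ===== LEMMAS AND PROOFS =====

theorem pvWhileEq_nil : pvWhileEq [] [] 0 = 0 := by
  rw [pvWhileEq]; simp

theorem pvWhileEq_shift (a b : Int) (as bs : List Int) (i : Nat) :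
    pvWhileEq (a :: as) (b :: bs) (i + 1) = pvWhileEq as bs i + 1 := by
  have h1 : (((i + 1 : Nat)) : Int) = ((i : Int)) + 1 := by push_cast; ring
  conv_lhs => rw [pvWhileEq]
  conv_rhs => rw [pvWhileEq]
  by_cases h : i < as.length ∧ PySem.List.pyGet? as (i : Int) = PySem.List.pyGet? bs (i : Int)
  · rw [if_pos h, if_pos]
    · exact pvWhileEq_shift a b as bs (i + 1)
    · refine ⟨by simpa using Nat.succ_lt_succ h.1, ?_⟩
      rw [h1, PySem.List.pyGet?_cons_succ, PySem.List.pyGet?_cons_succ]; exact h.2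
  · rw [if_neg h, if_neg]
    intro hc
    apply h
    refine ⟨by simpa using Nat.lt_of_succ_lt_succ hc.1, ?_⟩
    have := hc.2
    rw [h1, PySem.List.pyGet?_cons_succ, PySem.List.pyGet?_cons_succ] at this
    exact this
termination_by as.length - i

theorem pvWhileEq_cons_eq (a : Int) (as bs : List Int) :
    pvWhileEq (a :: as) (a :: bs) 0 = pvWhileEq as bs 0 + 1 := by
  rw [pvWhileEq]
  rw [if_pos]
  · exact pvWhileEq_shift a a as bs 0
  · constructor
    · simp
    · simp

theorem pvWhileEq_cons_ne (a b : Int) (as bs : List Int) (h : a ≠ b) :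
    pvWhileEq (a :: as) (b :: bs) 0 = 0 := by
  rw [pvWhileEq]
  rw [if_neg]
  intro hc
  have := hc.2
  simp at this
  exact h this

-- B's reversed fold peels off the HEAD pair (processed last, so it overwrites)
theorem pvFold_cons (a b : Int) (as bs : List Int) :
    (((a :: as).zip (b :: bs)).reverse).foldl pvStep false
      = pvStep ((as.zip bs).reverse.foldl pvStep false) (a, b) := by
  simp [List.zip_cons_cons, List.foldl_append]

-- main lemma, equal-length case
theorem pv_eqlen (m : List Int) : ∀ n : List Int, m.length = n.length →
    is_greater m n = (m.zip n).reverse.foldl pvStep false := by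
  induction m with
  | nil =>
    intro n hlen
    cases n with
    | nil =>
      simp [is_greater, is_equal, pvWhileEq_nil]
    | cons b bs => simp at hlen
  | cons a as ih =>
    intro n hlen
    cases n with
    | nil => simp at hlen
    | cons b bs =>
      have hlen' : as.length = bs.length := by simpa using hlen
      rw [pvFold_cons]
      by_cases hab : a = b
      · subst hab
        have hw := pvWhileEq_cons_eq a as bs
        have ihv := ih bs hlen'
        simp only [is_greater, is_equal] at ihv ⊢
        simp only [hlen', hw, List.length_cons, ne_eq, not_true_eq_false, if_false] at ihv ⊢
        have hcast : ((pvWhileEq as bs 0 + 1 : Nat) : Int) = ((pvWhileEq as bs 0 : Nat) : Int) + 1 := by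
          push_cast; ring
        by_cases heq : pvWhileEq as bs 0 = as.length
        · have hc : pvWhileEq as bs 0 = bs.length := by omega
          simp only [hc, decide_true, if_true] at ihv
          simp [heq, hlen', ← ihv, pvStep]
        · have h1 : ¬ (pvWhileEq as bs 0 + 1 = as.length + 1) := by omega
          simp only [decide_eq_true_eq] at ihv ⊢
          rw [hcast, PySem.List.pyGet?_cons_succ, PySem.List.pyGet?_cons_succ]
          simp only [pvStep, lt_irrefl, if_false]
          simpa [heq, hlen'] using ihv
      · have hw := pvWhileEq_cons_ne a b as bs hab
        simp only [is_greater, is_equal, hw, List.length_cons, hlen']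
        rcases lt_or_gt_of_ne hab with h | h
        · simp [pvStep, h, not_lt.mpr (le_of_lt h)]
        · simp [pvStep, h]

-- ===== VERDICT (by name: the statement is the Claim_ definition above) =====
theorem is_greater_spec : Claim_equal_is_greater := by
  intro m n _
  unfold Spec_is_greater is_greater_alt
  by_cases hlen : m.length = n.length
  · simp only [hlen, ne_eq, not_true_eq_false, if_false]
    exact pv_eqlen m n hlen
  · simp only [ne_eq, hlen, not_false_eq_true, if_true]
    have : is_equal m n = false := by simp [is_equal, hlen]
    by_cases hgt : m.length > n.length
    · simp [is_greater, this, hgt]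
    · have hlt : n.length > m.length := by omega
      simp [is_greater, this, hgt, hlt]
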